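-- pv_equiv track=rewrite | github.com/danqingli00-hash/FedADC | ToolsAna.py | findBestTeacherPt
-- ===== SOURCE A (Python) =====
-- def findBestTeacherPt(dynMap, pStu, tIndex, pNum, dNum):
--     diffSumMax = -1
--     pTea = 0
--     for pIndex in range(1, pNum + 1):
--         diffSum = 0
--         for dIndex in range(1, dNum + 1):
--             diffSum += abs(dynMap[pIndex][dIndex][tIndex] - dynMap[pStu][dIndex][tIndex])
--         if diffSum > diffSumMax:
--             diffSumMax = diffSum
--             pTea = pIndex
--     return pTea
-- ===== SOURCE B (Python) =====
-- def findBestTeacherPt(dynMap, pStu, tIndex, pNum, dNum):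
--     # Divide-and-conquer tournament argmax over participants: recursively take
--     # the best of the two halves, preferring the LEFT half on ties, which
--     # reproduces the first-maximum rule of a linear scan.
--     def diffSum(p):
--         return sum(abs(dynMap[p][d][tIndex] - dynMap[pStu][d][tIndex])
--                    for d in range(1, dNum + 1))
--
--     def best(lo, hi):  # best (sum, participant) over [lo, hi); requires lo < hi
--         if hi - lo == 1:
--             return (diffSum(lo), lo)
--         mid = (lo + hi) // 2
--         sL, pL = best(lo, mid)
--         sR, pR = best(mid, hi)
--         return (sR, pR) if sR > sL else (sL, pL)
--
--     if pNum < 1: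
--         return 0
--     return best(1, pNum + 1)[1]
-- ===== Notes on version B (the rewrite author's own statement) =====
-- stated objective: alternative
-- what changed: B replaces A's linear fused scan (inner sum plus running max with a sentinel -1) by a recursive divide-and-conquer tournament: best(lo,hi) splits the participant range at (lo+hi)//2, computes each half's champion recursively, and combines with strict 'sR > sL' so the left half wins ties, reproducing A's first-maximum rule; no loop over participants and no sentinel remain.
import Mathlib
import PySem

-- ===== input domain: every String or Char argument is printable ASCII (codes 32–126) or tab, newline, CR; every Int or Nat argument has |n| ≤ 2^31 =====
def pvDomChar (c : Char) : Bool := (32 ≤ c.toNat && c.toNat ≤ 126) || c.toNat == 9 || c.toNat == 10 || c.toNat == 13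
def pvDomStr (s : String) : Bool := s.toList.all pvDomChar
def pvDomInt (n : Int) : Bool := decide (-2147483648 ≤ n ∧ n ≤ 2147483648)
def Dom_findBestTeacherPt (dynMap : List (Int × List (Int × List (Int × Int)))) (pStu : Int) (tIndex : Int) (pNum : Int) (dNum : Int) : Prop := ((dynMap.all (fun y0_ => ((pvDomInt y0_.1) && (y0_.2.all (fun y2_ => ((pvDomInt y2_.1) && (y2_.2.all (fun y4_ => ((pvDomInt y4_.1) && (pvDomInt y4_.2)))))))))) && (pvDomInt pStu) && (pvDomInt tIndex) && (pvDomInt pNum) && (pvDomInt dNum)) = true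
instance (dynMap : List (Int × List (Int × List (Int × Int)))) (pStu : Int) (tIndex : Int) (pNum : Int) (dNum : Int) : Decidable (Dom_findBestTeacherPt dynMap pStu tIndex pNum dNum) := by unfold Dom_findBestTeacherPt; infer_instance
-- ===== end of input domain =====

-- B replaces A's linear fused scan by a recursive divide-and-conquer tournament over the
-- participant range (ties prefer the left half), a genuinely different decomposition of
-- the same O(pNum*dNum) work.

-- dynMap[p][d][t]: nested dict lookup (first match). Under Pre_ every needed key is present, so
-- the `getD` defaults are never the result; outside Pre_ Python raises KeyError.
def pvLk (dynMap : List (Int × List (Int × List (Int × Int)))) (p d t : Int) : Int :=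
  (((((dynMap.lookup p).getD []).lookup d).getD []).lookup t).getD 0

-- ===== PORT A =====
def findBestTeacherPt (dynMap : List (Int × List (Int × List (Int × Int)))) (pStu : Int) (tIndex : Int) (pNum : Int) (dNum : Int) : Int :=
  ((PySem.List.pyRange 1 (pNum + 1) 1).foldl
    (fun (st : Int × Int) pIndex =>
      let diffSum := (PySem.List.pyRange 1 (dNum + 1) 1).foldl
        (fun s dIndex => s + |pvLk dynMap pIndex dIndex tIndex - pvLk dynMap pStu dIndex tIndex|) 0
      if diffSum > st.1 then (diffSum, pIndex) else st)
    (-1, 0)).2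

-- ===== PORT B =====
-- diffSum(p) = sum(abs(...) for d in range(1, dNum + 1))
def pvDiffSum (dynMap : List (Int × List (Int × List (Int × Int)))) (pStu tIndex dNum p : Int) : Int :=
  ((PySem.List.pyRange 1 (dNum + 1) 1).map
    (fun d => |pvLk dynMap p d tIndex - pvLk dynMap pStu d tIndex|)).sum

-- best(lo, hi): tournament over [lo, hi). The Nat fuel only makes the recursion structural
-- (so it kernel-reduces); it starts at the range length and each half is strictly shorter,
-- so the fuel-0 / 'hi - lo ≤ 1' guards are pure totality devices (Python's base is hi - lo == 1
-- and best is never called with hi - lo < 1).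
def pvBest (g : Int → Int) (fuel : Nat) (lo hi : Int) : Int × Int :=
  match fuel with
  | 0 => (g lo, lo)
  | fuel + 1 =>
    if hi - lo ≤ 1 then (g lo, lo)
    else
      let mid := PySem.Int.floordiv (lo + hi) 2
      let L := pvBest g fuel lo mid
      let R := pvBest g fuel mid hi
      if R.1 > L.1 then R else L

def findBestTeacherPt_alt (dynMap : List (Int × List (Int × List (Int × Int)))) (pStu : Int) (tIndex : Int) (pNum : Int) (dNum : Int) : Int :=
  if pNum < 1 then 0
  else (pvBest (pvDiffSum dynMap pStu tIndex dNum) pNum.toNat 1 (pNum + 1)).2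

-- ===== PRECONDITION & SPEC =====
-- Pre_: every dictionary chain dynMap[p][d][tIndex] (p = 1..pNum and p = pStu, d = 1..dNum)
-- that the loops touch exists; exactly where Python A (and B) return instead of raising
-- KeyError. The two length bounds are IMPLIED by the key-existence conditions (keys 1..pNum
-- are distinct entries of the dict, likewise 1..dNum in each row) and only serve to make the
-- predicate decide fast on literals; they do not narrow the condition.
def pvRowOk (m2 : List (Int × List (Int × Int))) (tIndex dNum : Int) : Bool :=
  decide (dNum ≤ (m2.length : Int)) &&
  (PySem.List.pyRange 1 (dNum + 1) 1).all (fun d =>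
    match m2.lookup d with
    | none => false
    | some m3 => (m3.lookup tIndex).isSome)

def pvChainOk (dynMap : List (Int × List (Int × List (Int × Int)))) (p tIndex dNum : Int) : Bool :=
  match dynMap.lookup p with
  | none => false
  | some m2 => pvRowOk m2 tIndex dNum

def Pre_findBestTeacherPt (dynMap : List (Int × List (Int × List (Int × Int)))) (pStu : Int) (tIndex : Int) (pNum : Int) (dNum : Int) : Prop :=
  1 ≤ pNum → 1 ≤ dNum →
    pNum ≤ (dynMap.length : Int) ∧
    (∀ p ∈ PySem.List.pyRange 1 (pNum + 1) 1, pvChainOk dynMap p tIndex dNum = true) ∧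
    pvChainOk dynMap pStu tIndex dNum = true
instance (dynMap : List (Int × List (Int × List (Int × Int)))) (pStu : Int) (tIndex : Int) (pNum : Int) (dNum : Int) : Decidable (Pre_findBestTeacherPt dynMap pStu tIndex pNum dNum) := by unfold Pre_findBestTeacherPt; infer_instance

def pvWitness_findBestTeacherPt : (List (Int × List (Int × List (Int × Int)))) × Int × Int × Int × Int :=
  ([(1, [(1, [(0, 3)])]), (2, [(1, [(0, 7)])])], 1, 0, 2, 1)

def Spec_findBestTeacherPt (dynMap : List (Int × List (Int × List (Int × Int)))) (pStu : Int) (tIndex : Int) (pNum : Int) (dNum : Int) (out : Int) : Prop := out = findBestTeacherPt_alt dynMap pStu tIndex pNum dNum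
instance (dynMap : List (Int × List (Int × List (Int × Int)))) (pStu : Int) (tIndex : Int) (pNum : Int) (dNum : Int) (out : Int) : Decidable (Spec_findBestTeacherPt dynMap pStu tIndex pNum dNum out) := by unfold Spec_findBestTeacherPt; infer_instance

-- ===== CLAIM (what is proved, stated in full; the proofs are below) =====
def Claim_equal_findBestTeacherPt : Prop := ∀ (dynMap : List (Int × List (Int × List (Int × Int)))) (pStu : Int) (tIndex : Int) (pNum : Int) (dNum : Int), Dom_findBestTeacherPt dynMap pStu tIndex pNum dNum → Pre_findBestTeacherPt dynMap pStu tIndex pNum dNum → Spec_findBestTeacherPt dynMap pStu tIndex pNum dNum (findBestTeacherPt dynMap pStu tIndex pNum dNum)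

-- ===== LEMMAS AND PROOFS =====

-- A's fused inner summation is the map-sum B's diffSum computes
theorem pv_foldl_sum (w : Int → Int) (ds : List Int) (c : Int) :
    ds.foldl (fun s d => s + w d) c = c + (ds.map w).sum := by
  induction ds generalizing c with
  | nil => simp
  | cons d dt ih => rw [List.foldl_cons, ih]; simp [add_assoc]

-- the strict '>' running-max fold over a nonempty list a :: t, from any start st, equals
-- 'take the list's first maximum if it beats st, else st'
theorem pv_scan_first_max (g : Int → Int) (t : List Int) (a : Int) (st : Int × Int) :
    (a :: t).foldl (fun (st : Int × Int) p => if g p > st.1 then (g p, p) else st) st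
      = (if (t.foldl (fun (st : Int × Int) p => if g p > st.1 then (g p, p) else st) (g a, a)).1 > st.1
         then t.foldl (fun (st : Int × Int) p => if g p > st.1 then (g p, p) else st) (g a, a)
         else st) := by
  induction t generalizing a st with
  | nil => simp [List.foldl_cons]
  | cons q t ih =>
    rw [List.foldl_cons, ih q (if g a > st.1 then (g a, a) else st), ih q (g a, a)]
    split_ifs <;> simp_all <;> omega

-- the tournament equals the first-maximum of the linear scan over pyRange lo hi 1
theorem pv_best_eq_scan (g : Int → Int) (fuel : Nat) (lo hi : Int) (h : lo < hi)
    (hf : (hi - lo).toNat ≤ fuel) :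
    pvBest g fuel lo hi
      = (PySem.List.pyRange (lo + 1) hi 1).foldl
          (fun (st : Int × Int) p => if g p > st.1 then (g p, p) else st) (g lo, lo) := by
  induction fuel generalizing lo hi with
  | zero => omega
  | succ fuel ih =>
    rw [pvBest]
    by_cases hb : hi - lo ≤ 1
    · rw [if_pos hb, PySem.List.pyRange_one_eq_nil (a := lo + 1) (b := hi) (by omega)]; rfl
    · rw [if_neg hb]
      have he : PySem.Int.floordiv (lo + hi) 2 = (lo + hi) / 2 :=
        PySem.Int.floordiv_eq_ediv_of_pos (by omega)
      have hm1 : lo < PySem.Int.floordiv (lo + hi) 2 := by rw [he]; omega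
      have hm2 : PySem.Int.floordiv (lo + hi) 2 < hi := by rw [he]; omega
      set mid := PySem.Int.floordiv (lo + hi) 2
      have hL := ih lo mid hm1 (by omega)
      have hR := ih mid hi hm2 (by omega)
      simp only [hL, hR]
      have hsplit : PySem.List.pyRange (lo + 1) hi 1
          = PySem.List.pyRange (lo + 1) mid 1 ++ PySem.List.pyRange mid hi 1 :=
        PySem.List.pyRange_one_append _ _ _ (by omega) (by omega)
      have hcons : PySem.List.pyRange mid hi 1 = mid :: PySem.List.pyRange (mid + 1) hi 1 :=
        PySem.List.pyRange_one_cons hm2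
      rw [hsplit, List.foldl_append, hcons, pv_scan_first_max]

-- the running max's key never decreases along the scan
theorem pv_scan_fst_mono (g : Int → Int) (l : List Int) (st : Int × Int) :
    st.1 ≤ (l.foldl (fun (st : Int × Int) p => if g p > st.1 then (g p, p) else st) st).1 := by
  induction l generalizing st with
  | nil => exact le_refl _
  | cons q t ih =>
    rw [List.foldl_cons]
    refine le_trans ?_ (ih (if g q > st.1 then (g q, q) else st))
    split_ifs with hq
    · exact le_of_lt hq
    · exact le_refl _

-- ===== VERDICT (by name: the statement is the Claim_ definition above) =====
theorem findBestTeacherPt_spec : Claim_equal_findBestTeacherPt := by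
  intro dynMap pStu tIndex pNum dNum _ _
  show findBestTeacherPt dynMap pStu tIndex pNum dNum
      = findBestTeacherPt_alt dynMap pStu tIndex pNum dNum
  unfold findBestTeacherPt findBestTeacherPt_alt
  by_cases hp1 : pNum < 1
  · rw [if_pos hp1, PySem.List.pyRange_one_eq_nil (a := 1) (b := pNum + 1) (by omega)]; rfl
  · rw [if_neg hp1]
    set g : Int → Int := pvDiffSum dynMap pStu tIndex dNum with hg
    have hA : (PySem.List.pyRange 1 (pNum + 1) 1).foldl
        (fun (st : Int × Int) pIndex =>
          let diffSum := (PySem.List.pyRange 1 (dNum + 1) 1).foldl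
            (fun s dIndex => s + |pvLk dynMap pIndex dIndex tIndex - pvLk dynMap pStu dIndex tIndex|) 0
          if diffSum > st.1 then (diffSum, pIndex) else st) (-1, 0)
        = (PySem.List.pyRange 1 (pNum + 1) 1).foldl
            (fun (st : Int × Int) p => if g p > st.1 then (g p, p) else st) (-1, 0) := by
      apply PySem.List.foldl_congr_mem
      intro st p _
      show (if _ > st.1 then _ else st) = _
      rw [pv_foldl_sum, zero_add]
      rfl
    have h1lt : (1 : Int) < pNum + 1 := by omega
    rw [hA, PySem.List.pyRange_one_cons h1lt,
      pv_scan_first_max, pv_best_eq_scan g pNum.toNat 1 (pNum + 1) h1lt (by omega)]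
    set X := (PySem.List.pyRange (1 + 1) (pNum + 1) 1).foldl
        (fun (st : Int × Int) p => if g p > st.1 then (g p, p) else st) (g 1, 1) with hX
    have h0 : 0 ≤ g 1 := by
      apply List.sum_nonneg
      intro x hx
      rcases List.mem_map.mp hx with ⟨d, _, rfl⟩
      exact abs_nonneg _
    have hge : g 1 ≤ X.1 := pv_scan_fst_mono g _ (g 1, 1)
    have hc : X.1 > ((-1 : Int), (0 : Int)).1 := by show X.1 > -1; omega
    rw [if_pos hc]
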